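-- pv_equiv track=rewrite | github.com/vercah/string-attractors | attractor_module.py | get_smallest_attractor
-- ===== SOURCE A (Python) =====
-- from typing import Tuple
-- from itertools import combinations
-- import math
--
-- def check_attractor(word: list, attr: list) -> Tuple[bool, list]:
--     attr.sort()
--     deduplicate(attr)
--     start = 0
--     factors = {}
--     for i in range(0, len(attr)):
--         if start != attr[i]:
--             ok = False
--             missing = []
--             ok, missing = check_subfactors(start, attr[i]-1, word, attr, factors)
--             if not ok:
--                 return False, missing
--         start = attr[i]+1
--     if len(word)-1 != attr[-1]:
--         ok = False
--         missing = []
--         ok, missing = check_subfactors(attr[-1]+1, len(word)-1, word, attr, factors)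
--         if not ok:
--             return False, missing
--     return True, None
--
-- def check_subfactors(start: int, end: int, word: list, attr: list, factors: dict) -> Tuple[bool, list]:
--     for i in range(1, end-start+2): # goes through different lengths of factors
--         for j in range(start, end+2-i):
--             current = word[j:j+i]
--             if str(current) not in factors.keys(): # if it is, it has been already checked before
--                 result = crosses_attractor(current, word, attr)
--                 if (result is not None):
--                     factors[str(current)] = result
--                 else:
--                     return False, word[j:j+i]
--     return True, None
--
-- def crosses_attractor(factor: list, word: list, attr: list) -> int:
--     for at in attr:
--         if at not in range(len(word)):
--             continue
--         for i in range(max(0, at-len(word)+len(factor)), min(len(factor)-1, at)+1):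
--             is_in = True
--             for j in range(0, len(factor)):
--                 if factor[j] != word[at-i+j]:
--                     is_in = False
--                     break
--             if is_in:
--                 return at
--     return None
--
-- def deduplicate(what: list) -> list:
--     return list(dict.fromkeys(what))
--
-- def longest_repeated_length(seq: list) -> int:
--     longest = 1
--     for i in range(len(seq)):
--         for j in range(i+1, len(seq)):
--             if longest >= len(seq)-j: # cannot obtain longer factor from this position
--                 break
--             add = -1
--             while seq[i+add+1] == seq[j+add+1]:
--                 add += 1
--                 if(add > len(seq)-j-2): # checks if the next round of comparison fits in the array range
--                     break
--             if add + 1 > longest: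
--                 longest = add + 1
--     return longest
--
-- def number_of_letters(seq: list) -> int:
--     chars = []
--     for i in range(len(seq)):
--         if seq[i] not in chars:
--             chars.append(seq[i])
--     return len(chars)
--
-- def generate_subsets(size, n) -> list:
--     positions_set = set(range(n))
--     return list(combinations(positions_set, size))
--
-- def get_smallest_attractor(seq) -> list:
--     long_len = longest_repeated_length(seq)
--     letters = number_of_letters(seq)
--     lower_bound = max(math.floor(len(seq)/(long_len+1)), letters)
--     for i in range(lower_bound, len(seq)+1):
--         candidates = generate_subsets(i, len(seq))
--         for candidate in candidates:
--             if check_attractor(seq, list(candidate))[0]: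
--                 return list(candidate)
--     return []
-- ===== SOURCE B (Python) =====
-- from itertools import combinations
-- import math
--
-- # B: same size-by-size subset search, but the attractor check is direct:
-- # every substring (by start j and length i) must have SOME occurrence that
-- # crosses a candidate position -- no gap decomposition, no memo dict,
-- # crossing is tested before the slice comparison.
--
-- def longest_repeated_length(seq: list) -> int:
--     longest = 1
--     for i in range(len(seq)):
--         for j in range(i+1, len(seq)):
--             if longest >= len(seq)-j: # cannot obtain longer factor from this position
--                 break
--             add = -1
--             while seq[i+add+1] == seq[j+add+1]:
--                 add += 1
--                 if(add > len(seq)-j-2): # checks if the next round of comparison fits in the array range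
--                     break
--             if add + 1 > longest:
--                 longest = add + 1
--     return longest
--
-- def number_of_letters(seq: list) -> int:
--     chars = []
--     for i in range(len(seq)):
--         if seq[i] not in chars:
--             chars.append(seq[i])
--     return len(chars)
--
-- def is_attractor(seq: list, cand: tuple) -> bool:
--     n = len(seq)
--     return all(
--         any(any(p <= a < p + i for a in cand) and seq[p:p+i] == seq[j:j+i]
--             for p in range(n - i + 1))
--         for i in range(1, n + 1) for j in range(n - i + 1))
--
-- def get_smallest_attractor(seq) -> list:
--     n = len(seq)
--     lower_bound = max(math.floor(n / (longest_repeated_length(seq) + 1)),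
--                       number_of_letters(seq))
--     for size in range(lower_bound, n + 1):
--         for cand in combinations(range(n), size):
--             if is_attractor(seq, cand):
--                 return list(cand)
--     return []
-- ===== Notes on version B (the rewrite author's own statement) =====
-- stated objective: simpler
-- what changed: B keeps the size-by-size subset search but replaces A's whole verification machinery (sorting the candidate, walking the gaps between attractor positions, a memo dict keyed by str(factor), and a hand-rolled occurrence matcher) by one direct three-line check: every substring (start, length) must have some occurrence whose window crosses a candidate position.
import Mathlib
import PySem

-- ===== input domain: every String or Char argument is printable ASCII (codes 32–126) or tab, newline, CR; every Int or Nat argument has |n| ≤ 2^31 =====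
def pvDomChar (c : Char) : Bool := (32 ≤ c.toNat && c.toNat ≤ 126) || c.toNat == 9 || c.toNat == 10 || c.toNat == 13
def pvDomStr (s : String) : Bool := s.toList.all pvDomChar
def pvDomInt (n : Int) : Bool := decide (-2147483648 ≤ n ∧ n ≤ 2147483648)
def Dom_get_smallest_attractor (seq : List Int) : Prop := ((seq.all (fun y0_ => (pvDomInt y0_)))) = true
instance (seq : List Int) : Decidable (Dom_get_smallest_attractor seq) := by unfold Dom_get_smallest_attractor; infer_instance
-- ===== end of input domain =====

-- B keeps A's size-by-size subset search but replaces the gap-decomposition + memo-dict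
-- attractor check by a direct "every substring has an occurrence crossing the candidate"
-- check (objective: simpler; no speed claim).

-- ===== PORT A =====

-- inner j-loop of crosses_attractor ('is_in' flag with break = all);
-- every index is in range at every call site, so pyGet? never sees none
def crossesInner (factor word : List Int) (at_ i : Int) : Bool :=
  (PySem.List.pyRange 0 (factor.length : Int) 1).all
    (fun j => PySem.List.pyGet? factor j == PySem.List.pyGet? word (at_ - i + j))

def crosses_attractor (factor word attr : List Int) : Option Int :=
  match attr with
  | [] => none
  | at_ :: rest =>
    if ¬ (0 ≤ at_ ∧ at_ < (word.length : Int)) then crosses_attractor factor word rest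
    else if (PySem.List.pyRange (max 0 (at_ - (word.length : Int) + (factor.length : Int)))
              (min ((factor.length : Int) - 1) at_ + 1) 1).any
             (fun i => crossesInner factor word at_ i)
    then some at_
    else crosses_attractor factor word rest

-- Python keys the memo by str(current); str is injective on lists of ints, so a dict
-- keyed by the list itself is an exact rendering of the same memo.
-- inner j-loop of check_subfactors ('current' written out; word[j:j+i]):
def csfJ (word attr : List Int) (i : Int) (js : List Int) (factors : PySem.Dict (List Int) Int) :
    Bool × Option (List Int) × PySem.Dict (List Int) Int :=
  match js with
  | [] => (true, none, factors)
  | j :: rest =>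
    if factors.contains (PySem.List.slice word (some j) (some (j + i))) then
      csfJ word attr i rest factors
    else
      match crosses_attractor (PySem.List.slice word (some j) (some (j + i))) word attr with
      | some r => csfJ word attr i rest
          (factors.insert (PySem.List.slice word (some j) (some (j + i))) r)
      | none => (false, some (PySem.List.slice word (some j) (some (j + i))), factors)

-- outer i-loop of check_subfactors
def csfI (start stop : Int) (word attr : List Int) (is_ : List Int) (factors : PySem.Dict (List Int) Int) :
    Bool × Option (List Int) × PySem.Dict (List Int) Int :=
  match is_ with
  | [] => (true, none, factors)
  | i :: rest =>
    if (csfJ word attr i (PySem.List.pyRange start (stop + 2 - i) 1) factors).1 then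
      csfI start stop word attr rest (csfJ word attr i (PySem.List.pyRange start (stop + 2 - i) 1) factors).2.2
    else csfJ word attr i (PySem.List.pyRange start (stop + 2 - i) 1) factors

def check_subfactors (start stop : Int) (word attr : List Int) (factors : PySem.Dict (List Int) Int) :
    Bool × Option (List Int) × PySem.Dict (List Int) Int :=
  csfI start stop word attr (PySem.List.pyRange 1 (stop - start + 2) 1) factors

-- the 'for i in range(0, len(attr))' loop of check_attractor, tracking start,
-- the memo dict and the early return
def caLoop (word attr : List Int) (elems : List Int) (start : Int) (factors : PySem.Dict (List Int) Int) :
    Bool × Option (List Int) × Int × PySem.Dict (List Int) Int :=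
  match elems with
  | [] => (true, none, start, factors)
  | a :: rest =>
    if start ≠ a then
      if (check_subfactors start (a - 1) word attr factors).1 then
        caLoop word attr rest (a + 1) (check_subfactors start (a - 1) word attr factors).2.2
      else (false, (check_subfactors start (a - 1) word attr factors).2.1, start, factors)
    else caLoop word attr rest (a + 1) factors

def deduplicate (what : List Int) : List Int := PySem.List.dedup what

def check_attractor (word attr0 : List Int) : Bool × Option (List Int) :=
  let attr := PySem.List.sorted attr0 (fun x => x) false
  let _ := deduplicate attr     -- Python calls deduplicate(attr) and discards the result
  -- attr[-1] (evaluated twice, as in the source); attr is nonempty whenever Python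
  -- reaches it under Pre_, so pyGetD's default is never read
  if (caLoop word attr attr 0 PySem.Dict.empty).1 then
    if (word.length : Int) - 1 ≠ PySem.List.pyGetD attr (-1) 0 then
      if (check_subfactors (PySem.List.pyGetD attr (-1) 0 + 1) ((word.length : Int) - 1) word attr
            (caLoop word attr attr 0 PySem.Dict.empty).2.2.2).1 then (true, none)
      else (false, (check_subfactors (PySem.List.pyGetD attr (-1) 0 + 1) ((word.length : Int) - 1) word attr
            (caLoop word attr attr 0 PySem.Dict.empty).2.2.2).2.1)
    else (true, none)
  else (false, (caLoop word attr attr 0 PySem.Dict.empty).2.1)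

-- while loop of longest_repeated_length; the fuel only makes it total (the loop runs < len(seq) times)
def lrlWhile (seq : List Int) (i j : Int) : Nat → Int → Int
  | 0, add => add
  | fuel + 1, add =>
    if PySem.List.pyGet? seq (i + add + 1) == PySem.List.pyGet? seq (j + add + 1) then
      if add + 1 > (seq.length : Int) - j - 2 then add + 1 else lrlWhile seq i j fuel (add + 1)
    else add

def lrlJ (seq : List Int) (i : Int) (js : List Int) (longest : Int) : Int :=
  match js with
  | [] => longest
  | j :: rest =>
    if longest ≥ (seq.length : Int) - j then longest      -- 'break'
    else lrlJ seq i rest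
      (if lrlWhile seq i j (seq.length + 1) (-1) + 1 > longest
       then lrlWhile seq i j (seq.length + 1) (-1) + 1 else longest)

def longest_repeated_length (seq : List Int) : Int :=
  (PySem.List.pyRange 0 (seq.length : Int) 1).foldl
    (fun longest i => lrlJ seq i (PySem.List.pyRange (i + 1) (seq.length : Int) 1) longest) 1

def number_of_letters (seq : List Int) : Int :=
  ((PySem.List.pyRange 0 (seq.length : Int) 1).foldl
    (fun chars i =>
      if chars.contains (PySem.List.pyGetD seq i 0) then chars
      else chars ++ [PySem.List.pyGetD seq i 0]) ([] : List Int)).length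

-- generate_subsets(size, n) = combinations(set(range(n)), size); CPython iterates set(range(n)) ascending here
def generate_subsets (size : Nat) (n : Int) : List (List Int) :=
  PySem.List.combinations (PySem.List.pyRange 0 n 1) size

def gsaInner (seq : List Int) (cands : List (List Int)) : Option (List Int) :=
  match cands with
  | [] => none
  | c :: rest => if (check_attractor seq c).1 then some c else gsaInner seq rest

def gsaOuter (seq : List Int) (sizes : List Int) : List Int :=
  match sizes with
  | [] => []
  | s :: rest =>
    -- s ≥ lower_bound ≥ 0, so s.toNat is exact
    match gsaInner seq (generate_subsets s.toNat (seq.length : Int)) with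
    | some c => c
    | none => gsaOuter seq rest

def get_smallest_attractor (seq : List Int) : List Int :=
  let long_len := longest_repeated_length seq
  let letters := number_of_letters seq
  -- math.floor(len(seq)/(long_len+1)) = integer floor division on this domain
  let lower_bound := max (PySem.Int.floordiv (seq.length : Int) (long_len + 1)) letters
  gsaOuter seq (PySem.List.pyRange lower_bound ((seq.length : Int) + 1) 1)

-- ===== PORT B =====

-- Source B's longest_repeated_length and number_of_letters are verbatim copies of A's
-- helpers (only the attractor check and the search changed), so their ports are shared.

def altCheck (seq cand : List Int) : Bool :=
  (PySem.List.pyRange 1 ((seq.length : Int) + 1) 1).all fun i =>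
    (PySem.List.pyRange 0 ((seq.length : Int) - i + 1) 1).all fun j =>
      (PySem.List.pyRange 0 ((seq.length : Int) - i + 1) 1).any fun p =>
        (cand.any fun a => decide (p ≤ a) && decide (a < p + i)) &&
        (PySem.List.slice seq (some p) (some (p + i)) == PySem.List.slice seq (some j) (some (j + i)))

def altFind (seq : List Int) (cands : List (List Int)) : Option (List Int) :=
  match cands with
  | [] => none
  | c :: rest => if altCheck seq c then some c else altFind seq rest

def altOuter (seq : List Int) (sizes : List Int) : List Int :=
  match sizes with
  | [] => []
  | s :: rest =>
    match altFind seq (PySem.List.combinations (PySem.List.pyRange 0 (seq.length : Int) 1) s.toNat) with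
    | some c => c
    | none => altOuter seq rest

def get_smallest_attractor_alt (seq : List Int) : List Int :=
  let lower_bound := max (PySem.Int.floordiv (seq.length : Int) (longest_repeated_length seq + 1))
                         (number_of_letters seq)
  altOuter seq (PySem.List.pyRange lower_bound ((seq.length : Int) + 1) 1)

-- ===== PRECONDITION & SPEC =====
-- Pre_ excludes only the empty list, on which A raises IndexError (attr[-1] on the empty candidate).
def Pre_get_smallest_attractor (seq : List Int) : Prop := seq ≠ []
instance (seq : List Int) : Decidable (Pre_get_smallest_attractor seq) := by
  unfold Pre_get_smallest_attractor; infer_instance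

def pvWitness_get_smallest_attractor : List Int := [1, 2, 1]

def Spec_get_smallest_attractor (seq : List Int) (out : List Int) : Prop := out = get_smallest_attractor_alt seq
instance (seq : List Int) (out : List Int) : Decidable (Spec_get_smallest_attractor seq out) := by unfold Spec_get_smallest_attractor; infer_instance

-- ===== CLAIM (what is proved, stated in full; the proofs are below) =====
def Claim_equal_get_smallest_attractor : Prop := ∀ (seq : List Int), Dom_get_smallest_attractor seq → Pre_get_smallest_attractor seq → Spec_get_smallest_attractor seq (get_smallest_attractor seq)

-- ===== LEMMAS AND PROOFS =====

-- "(j,i) names a substring of seq that has an occurrence crossing cand"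
def Covered (seq cand : List Int) (j i : Int) : Prop :=
  ∃ p, 0 ≤ p ∧ p + i ≤ (seq.length : Int) ∧
    PySem.List.slice seq (some p) (some (p + i)) = PySem.List.slice seq (some j) (some (j + i)) ∧
    ∃ a ∈ cand, p ≤ a ∧ a < p + i

def AllCov (seq cand : List Int) : Prop :=
  ∀ j i : Int, 0 ≤ j → 1 ≤ i → j + i ≤ (seq.length : Int) → Covered seq cand j i

def DInv (seq cand : List Int) (D : PySem.Dict (List Int) Int) : Prop :=
  ∀ f, D.contains f = true → (crosses_attractor f seq cand).isSome = true

def lastStart : List Int → Int → Int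
  | [], s => s
  | a :: rest, _ => lastStart rest (a + 1)

lemma sliceLen (seq : List Int) {j i : Int} (h0 : 0 ≤ j) (h1 : 0 ≤ i)
    (h2 : j + i ≤ (seq.length : Int)) :
    (PySem.List.slice seq (some j) (some (j + i))).length = i.toNat := by
  rw [PySem.List.slice_toNat seq h0 (by omega)]
  rw [List.length_take, List.length_drop]
  omega

lemma sliceGet (seq : List Int) {j i : Int} (h0 : 0 ≤ j) (_h2 : j + i ≤ (seq.length : Int))
    (k : Nat) (hk : (k : Int) < i) :
    (PySem.List.slice seq (some j) (some (j + i)))[k]? = seq[j.toNat + k]? := by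
  rw [PySem.List.slice_toNat seq h0 (by omega)]
  rw [List.getElem?_take, List.getElem?_drop]
  rw [if_pos (by omega)]

lemma allEq_iff (seq : List Int) {p j i : Int} (hp0 : 0 ≤ p) (hpn : p + i ≤ (seq.length : Int))
    (hj0 : 0 ≤ j) (hjn : j + i ≤ (seq.length : Int)) (hi : 1 ≤ i) :
    ((PySem.List.pyRange 0 i 1).all fun k =>
      PySem.List.pyGet? (PySem.List.slice seq (some j) (some (j + i))) k ==
        PySem.List.pyGet? seq (p + k)) = true
    ↔ PySem.List.slice seq (some p) (some (p + i)) = PySem.List.slice seq (some j) (some (j + i)) := by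
  rw [List.all_eq_true]
  constructor
  · intro h
    apply List.ext_getElem?
    intro k
    by_cases hk : (k : Int) < i
    · have hh := h (k : Int) (by rw [PySem.List.mem_pyRange_one]; exact ⟨Int.natCast_nonneg k, hk⟩)
      rw [beq_iff_eq, PySem.List.pyGet?_natCast] at hh
      have he : p + (k : Int) = ((p.toNat + k : Nat) : Int) := by omega
      rw [he, PySem.List.pyGet?_natCast] at hh
      rw [sliceGet seq hj0 hjn k hk] at hh
      rw [sliceGet seq hp0 hpn k hk, sliceGet seq hj0 hjn k hk]
      exact hh.symm
    · have e1 : (PySem.List.slice seq (some p) (some (p + i))).length ≤ k := by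
        rw [sliceLen seq hp0 (by omega) hpn]; omega
      have e2 : (PySem.List.slice seq (some j) (some (j + i))).length ≤ k := by
        rw [sliceLen seq hj0 (by omega) hjn]; omega
      rw [List.getElem?_eq_none e1, List.getElem?_eq_none e2]
  · intro h k hk
    rw [PySem.List.mem_pyRange_one] at hk
    obtain ⟨m, rfl⟩ := Int.eq_ofNat_of_zero_le hk.1
    rw [beq_iff_eq, PySem.List.pyGet?_natCast]
    have he : p + (m : Int) = ((p.toNat + m : Nat) : Int) := by omega
    rw [he, PySem.List.pyGet?_natCast]
    rw [← h, sliceGet seq hp0 hpn m hk.2]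


lemma crossesInner_iff (seq : List Int) {j i at_ i' : Int}
    (hj0 : 0 ≤ j) (hi : 1 ≤ i) (hjn : j + i ≤ (seq.length : Int))
    (hp0 : 0 ≤ at_ - i') (hpn : at_ - i' + i ≤ (seq.length : Int)) :
    crossesInner (PySem.List.slice seq (some j) (some (j + i))) seq at_ i' = true
    ↔ PySem.List.slice seq (some (at_ - i')) (some (at_ - i' + i)) =
        PySem.List.slice seq (some j) (some (j + i)) := by
  have hlen : ((PySem.List.slice seq (some j) (some (j + i))).length : Int) = i := by
    rw [sliceLen seq hj0 (by omega) hjn]; omega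
  unfold crossesInner
  rw [hlen]
  exact allEq_iff seq hp0 hpn hj0 hjn hi

lemma crosses_isSome_iff (seq : List Int) (cand : List Int) {j i : Int}
    (hj0 : 0 ≤ j) (hi : 1 ≤ i) (hjn : j + i ≤ (seq.length : Int))
    (hmem : ∀ a ∈ cand, 0 ≤ a ∧ a < (seq.length : Int)) :
    (crosses_attractor (PySem.List.slice seq (some j) (some (j + i))) seq cand).isSome = true
    ↔ Covered seq cand j i := by
  induction cand with
  | nil =>
    simp only [crosses_attractor, Option.isSome_none, Bool.false_eq_true, false_iff]
    rintro ⟨p, _, _, _, a, ha, _⟩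
    exact absurd ha (List.not_mem_nil)
  | cons a rest ih =>
    have ha := hmem a (List.mem_cons_self ..)
    have hlen : ((PySem.List.slice seq (some j) (some (j + i))).length : Int) = i := by
      rw [sliceLen seq hj0 (by omega) hjn]; omega
    rw [crosses_attractor.eq_def]
    simp only
    rw [if_neg (not_not_intro ha), hlen]
    by_cases hany : ((PySem.List.pyRange (max 0 (a - (seq.length : Int) + i)) (min (i - 1) a + 1) 1).any
        fun i' => crossesInner (PySem.List.slice seq (some j) (some (j + i))) seq a i') = true
    · rw [if_pos hany]
      simp only [Option.isSome_some, true_iff]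
      obtain ⟨i', hi'mem, hci⟩ := List.any_eq_true.mp hany
      rw [PySem.List.mem_pyRange_one] at hi'mem
      have hb1 : 0 ≤ i' := by omega
      have hb2 : a - (seq.length : Int) + i ≤ i' := by omega
      have hb3 : i' ≤ i - 1 := by omega
      have hb4 : i' ≤ a := by omega
      rw [crossesInner_iff seq hj0 hi hjn (by omega) (by omega)] at hci
      exact ⟨a - i', by omega, by omega, hci, a, List.mem_cons_self .., by omega, by omega⟩
    · rw [if_neg hany]
      rw [ih (fun x hx => hmem x (List.mem_cons_of_mem _ hx))]
      constructor
      · rintro ⟨p, h1, h2, h3, a', ha', h4, h5⟩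
        exact ⟨p, h1, h2, h3, a', List.mem_cons_of_mem _ ha', h4, h5⟩
      · rintro ⟨p, h1, h2, h3, a', ha', h4, h5⟩
        rcases List.mem_cons.mp ha' with rfl | hm
        · exfalso
          apply hany
          rw [List.any_eq_true]
          refine ⟨a' - p, by rw [PySem.List.mem_pyRange_one]; omega, ?_⟩
          rw [crossesInner_iff seq hj0 hi hjn (by omega) (by omega)]
          have he : a' - (a' - p) = p := by omega
          rw [he]
          exact h3
        · exact ⟨p, h1, h2, h3, a', hm, h4, h5⟩

lemma altCheck_iff (seq cand : List Int) :
    altCheck seq cand = true ↔ AllCov seq cand := by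
  unfold altCheck AllCov
  rw [List.all_eq_true]
  constructor
  · intro h j i hj0 hi hjn
    have h1 := h i (by rw [PySem.List.mem_pyRange_one]; omega)
    rw [List.all_eq_true] at h1
    have h2 := h1 j (by rw [PySem.List.mem_pyRange_one]; omega)
    obtain ⟨p, hpmem, hp⟩ := List.any_eq_true.mp h2
    rw [PySem.List.mem_pyRange_one] at hpmem
    rw [Bool.and_eq_true] at hp
    obtain ⟨hcross, hslice⟩ := hp
    obtain ⟨a, hamem, hab⟩ := List.any_eq_true.mp hcross
    rw [Bool.and_eq_true, decide_eq_true_eq, decide_eq_true_eq] at hab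
    rw [beq_iff_eq] at hslice
    exact ⟨p, by omega, by omega, hslice, a, hamem, hab.1, hab.2⟩
  · intro h i himem
    rw [List.all_eq_true]
    intro j hjmem
    rw [PySem.List.mem_pyRange_one] at himem hjmem
    obtain ⟨p, h1, h2, h3, a, ha, h4, h5⟩ := h j i (by omega) (by omega) (by omega)
    rw [List.any_eq_true]
    refine ⟨p, by rw [PySem.List.mem_pyRange_one]; omega, ?_⟩
    rw [Bool.and_eq_true]
    constructor
    · rw [List.any_eq_true]
      exact ⟨a, ha, by simp [h4, h5]⟩
    · rw [beq_iff_eq]; exact h3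

lemma csfJ_true (seq cand : List Int) (i : Int) (js : List Int)
    (D : PySem.Dict (List Int) Int)
    (h : ∀ j ∈ js, (crosses_attractor (PySem.List.slice seq (some j) (some (j + i))) seq cand).isSome = true) :
    (csfJ seq cand i js D).1 = true := by
  induction js generalizing D with
  | nil => rfl
  | cons j rest ih =>
    rw [csfJ]
    by_cases hc : D.contains (PySem.List.slice seq (some j) (some (j + i))) = true
    · rw [if_pos hc]
      exact ih _ (fun j' hj' => h j' (List.mem_cons_of_mem _ hj'))
    · rw [if_neg hc]
      have hs := h j (List.mem_cons_self ..)
      rcases hcr : crosses_attractor (PySem.List.slice seq (some j) (some (j + i))) seq cand with _ | r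
      · rw [hcr] at hs; simp at hs
      · exact ih _ (fun j' hj' => h j' (List.mem_cons_of_mem _ hj'))

lemma csfI_true (start stop : Int) (seq cand : List Int) (is_ : List Int)
    (D : PySem.Dict (List Int) Int)
    (h : ∀ i ∈ is_, ∀ j ∈ PySem.List.pyRange start (stop + 2 - i) 1,
      (crosses_attractor (PySem.List.slice seq (some j) (some (j + i))) seq cand).isSome = true) :
    (csfI start stop seq cand is_ D).1 = true := by
  induction is_ generalizing D with
  | nil => rfl
  | cons i rest ih =>
    rw [csfI]
    have h1 : (csfJ seq cand i (PySem.List.pyRange start (stop + 2 - i) 1) D).1 = true :=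
      csfJ_true seq cand i _ D (h i (List.mem_cons_self ..))
    rw [if_pos h1]
    exact ih _ (fun i' hi' => h i' (List.mem_cons_of_mem _ hi'))

lemma caLoop_true (seq cand : List Int)
    (hAll : ∀ j i : Int, 0 ≤ j → 1 ≤ i → j + i ≤ (seq.length : Int) →
      (crosses_attractor (PySem.List.slice seq (some j) (some (j + i))) seq cand).isSome = true) :
    ∀ (elems : List Int) (start : Int) (D : PySem.Dict (List Int) Int),
      (∀ a ∈ elems, a < (seq.length : Int)) → (∀ a ∈ elems, 0 ≤ a) → 0 ≤ start →
      (caLoop seq cand elems start D).1 = true := by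
  intro elems
  induction elems with
  | nil => intro start D _ _ _; rfl
  | cons a rest ih =>
    intro start D hmem_e hmem_e0 hstart
    rw [caLoop]
    have han := hmem_e a (List.mem_cons_self ..)
    have ha0 := hmem_e0 a (List.mem_cons_self ..)
    by_cases hsa : start ≠ a
    · rw [if_pos hsa]
      have h1 : (check_subfactors start (a - 1) seq cand D).1 = true := by
        unfold check_subfactors
        apply csfI_true
        intro i hi j hj
        rw [PySem.List.mem_pyRange_one] at hi hj
        exact hAll j i (by omega) (by omega) (by omega)
      rw [if_pos h1]
      exact ih (a + 1) _ (fun x hx => hmem_e x (List.mem_cons_of_mem _ hx))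
        (fun x hx => hmem_e0 x (List.mem_cons_of_mem _ hx)) (by omega)
    · rw [if_neg hsa]
      exact ih (a + 1) _ (fun x hx => hmem_e x (List.mem_cons_of_mem _ hx))
        (fun x hx => hmem_e0 x (List.mem_cons_of_mem _ hx)) (by omega)

lemma sorted_self (cand : List Int) (hpw : cand.Pairwise (· < ·)) :
    PySem.List.sorted cand (fun x => x) false = cand :=
  PySem.List.sorted_eq_of_perm_of_pairwise_lt cand cand (fun x => x) (List.Perm.refl _) hpw

lemma check_complete (seq cand : List Int) (hpw : cand.Pairwise (· < ·)) (hne : cand ≠ [])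
    (hmem : ∀ a ∈ cand, 0 ≤ a ∧ a < (seq.length : Int))
    (hAll : AllCov seq cand) :
    (check_attractor seq cand).1 = true := by
  have hCross : ∀ j i : Int, 0 ≤ j → 1 ≤ i → j + i ≤ (seq.length : Int) →
      (crosses_attractor (PySem.List.slice seq (some j) (some (j + i))) seq cand).isSome = true :=
    fun j i hj0 hi hjn => (crosses_isSome_iff seq cand hj0 hi hjn hmem).mpr (hAll j i hj0 hi hjn)
  have hL : (caLoop seq cand cand 0 PySem.Dict.empty).1 = true :=
    caLoop_true seq cand hCross cand 0 _ (fun a ha => (hmem a ha).2) (fun a ha => (hmem a ha).1)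
      le_rfl
  have hl := hmem _ (List.getLast_mem hne)
  simp only [check_attractor, sorted_self cand hpw]
  rw [PySem.List.pyGetD_neg_one cand 0 hne, if_pos hL]
  by_cases hcase : (seq.length : Int) - 1 ≠ cand.getLast hne
  · rw [if_pos hcase]
    have ht : (check_subfactors (cand.getLast hne + 1) ((seq.length : Int) - 1) seq cand
        (caLoop seq cand cand 0 PySem.Dict.empty).2.2.2).1 = true := by
      unfold check_subfactors
      apply csfI_true
      intro i hi j hj
      rw [PySem.List.mem_pyRange_one] at hi hj
      exact hCross j i (by omega) (by omega) (by omega)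
    rw [if_pos ht]
  · rw [if_neg hcase]

lemma csfJ_sound (seq cand : List Int) (i : Int) (js : List Int)
    (D : PySem.Dict (List Int) Int)
    (hInv : DInv seq cand D) (htrue : (csfJ seq cand i js D).1 = true) :
    (∀ j ∈ js, (crosses_attractor (PySem.List.slice seq (some j) (some (j + i))) seq cand).isSome = true)
    ∧ DInv seq cand (csfJ seq cand i js D).2.2 := by
  induction js generalizing D with
  | nil => exact ⟨by simp, hInv⟩
  | cons j rest ih =>
    rw [csfJ] at htrue ⊢
    by_cases hc : D.contains (PySem.List.slice seq (some j) (some (j + i))) = true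
    · rw [if_pos hc] at htrue ⊢
      obtain ⟨h1, h2⟩ := ih D hInv htrue
      refine ⟨?_, h2⟩
      intro j' hj'
      rcases List.mem_cons.mp hj' with rfl | hm
      · exact hInv _ hc
      · exact h1 j' hm
    · rw [if_neg hc] at htrue ⊢
      rcases hcr : crosses_attractor (PySem.List.slice seq (some j) (some (j + i))) seq cand with _ | r
      · rw [hcr] at htrue; simp at htrue
      · rw [hcr] at htrue
        have hInv' : DInv seq cand (D.insert (PySem.List.slice seq (some j) (some (j + i))) r) := by
          intro f hf
          rw [PySem.Dict.contains_insert] at hf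
          rcases Bool.or_eq_true_iff.mp hf with hb | hb
          · rw [eq_of_beq hb, hcr]; rfl
          · exact hInv f hb
        obtain ⟨h1, h2⟩ := ih _ hInv' htrue
        refine ⟨?_, h2⟩
        intro j' hj'
        rcases List.mem_cons.mp hj' with rfl | hm
        · rw [hcr]; rfl
        · exact h1 j' hm

lemma csfI_sound (start stop : Int) (seq cand : List Int) (is_ : List Int)
    (D : PySem.Dict (List Int) Int)
    (hInv : DInv seq cand D) (htrue : (csfI start stop seq cand is_ D).1 = true) :
    (∀ i ∈ is_, ∀ j ∈ PySem.List.pyRange start (stop + 2 - i) 1,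
      (crosses_attractor (PySem.List.slice seq (some j) (some (j + i))) seq cand).isSome = true)
    ∧ DInv seq cand (csfI start stop seq cand is_ D).2.2 := by
  induction is_ generalizing D with
  | nil => exact ⟨by simp, hInv⟩
  | cons i rest ih =>
    rw [csfI] at htrue ⊢
    by_cases h1 : (csfJ seq cand i (PySem.List.pyRange start (stop + 2 - i) 1) D).1 = true
    · rw [if_pos h1] at htrue ⊢
      obtain ⟨hA, hI⟩ := csfJ_sound seq cand i _ D hInv h1
      obtain ⟨hB, hI2⟩ := ih _ hI htrue
      refine ⟨?_, hI2⟩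
      intro i' hi'
      rcases List.mem_cons.mp hi' with rfl | hm
      · exact hA
      · exact hB i' hm
    · rw [if_neg h1] at htrue
      exact absurd htrue h1

lemma caLoop_sound (seq cand : List Int) :
    ∀ (elems : List Int) (start : Int) (D : PySem.Dict (List Int) Int),
      DInv seq cand D →
      (∀ a ∈ elems, a < (seq.length : Int)) →
      (∀ a ∈ elems, start ≤ a) →
      elems.Pairwise (· < ·) →
      (caLoop seq cand elems start D).1 = true →
      DInv seq cand (caLoop seq cand elems start D).2.2.2
      ∧ (caLoop seq cand elems start D).2.2.1 = lastStart elems start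
      ∧ ∀ j i : Int, start ≤ j → 1 ≤ i → j + i ≤ lastStart elems start →
          (∀ a ∈ elems, ¬(j ≤ a ∧ a < j + i)) →
          (crosses_attractor (PySem.List.slice seq (some j) (some (j + i))) seq cand).isSome = true := by
  intro elems
  induction elems with
  | nil =>
    intro start D hInv _ _ _ _
    refine ⟨hInv, rfl, ?_⟩
    intro j i h1 h2 h3 _
    exact absurd h3 (by simp only [lastStart]; omega)
  | cons a rest ih =>
    intro start D hInv hmem_e hlb hpw htrue
    obtain ⟨hpw1, hpw2⟩ := List.pairwise_cons.mp hpw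
    have hrest_lb : ∀ x ∈ rest, a + 1 ≤ x := fun x hx => by have := hpw1 x hx; omega
    have hrest_mem : ∀ x ∈ rest, x < (seq.length : Int) :=
      fun x hx => hmem_e x (List.mem_cons_of_mem _ hx)
    rw [caLoop] at htrue ⊢
    have hLS : lastStart (a :: rest) start = lastStart rest (a + 1) := rfl
    by_cases hsa : start ≠ a
    · rw [if_pos hsa] at htrue ⊢
      by_cases hg : (check_subfactors start (a - 1) seq cand D).1 = true
      · rw [if_pos hg] at htrue ⊢
        have hgap := csfI_sound start (a - 1) seq cand _ D hInv
          (by unfold check_subfactors at hg; exact hg)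
        obtain ⟨hI, hS, hC⟩ := ih (a + 1) (check_subfactors start (a - 1) seq cand D).2.2
          (by unfold check_subfactors; exact hgap.2) hrest_mem hrest_lb hpw2 htrue
        refine ⟨hI, by rw [hS, hLS], ?_⟩
        intro j i h1 h2 h3 hdisj
        by_cases hji : j + i ≤ a
        · exact hgap.1 i (by rw [PySem.List.mem_pyRange_one]; omega) j
            (by rw [PySem.List.mem_pyRange_one]; omega)
        · have hja : a + 1 ≤ j := by
            have := hdisj a (List.mem_cons_self ..); omega
          exact hC j i hja h2 (by rw [← hLS]; exact h3)
            (fun x hx => hdisj x (List.mem_cons_of_mem _ hx))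
      · rw [if_neg hg] at htrue; simp at htrue
    · rw [if_neg hsa] at htrue ⊢
      obtain ⟨hI, hS, hC⟩ := ih (a + 1) D hInv hrest_mem hrest_lb hpw2 htrue
      refine ⟨hI, by rw [hS, hLS], ?_⟩
      intro j i h1 h2 h3 hdisj
      have hsa' : start = a := by omega
      have hja : a + 1 ≤ j := by
        have := hdisj a (List.mem_cons_self ..); omega
      exact hC j i hja h2 (by rw [← hLS]; exact h3)
        (fun x hx => hdisj x (List.mem_cons_of_mem _ hx))

lemma lastStart_eq : ∀ (elems : List Int) (h : elems ≠ []) (s : Int),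
    lastStart elems s = elems.getLast h + 1
  | [a], _, s => by simp [lastStart, List.getLast]
  | a :: b :: t, _, s => by
    rw [show lastStart (a :: b :: t) s = lastStart (b :: t) (a + 1) from rfl]
    rw [lastStart_eq (b :: t) (by simp) (a + 1)]
    simp [List.getLast_cons]

lemma check_sound (seq cand : List Int) (hpw : cand.Pairwise (· < ·)) (hne : cand ≠ [])
    (hmem : ∀ a ∈ cand, 0 ≤ a ∧ a < (seq.length : Int))
    (htrue : (check_attractor seq cand).1 = true) :
    AllCov seq cand := by
  simp only [check_attractor, sorted_self cand hpw, PySem.List.pyGetD_neg_one cand 0 hne] at htrue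
  by_cases hL : (caLoop seq cand cand 0 PySem.Dict.empty).1 = true
  · rw [if_pos hL] at htrue
    obtain ⟨hI, hS, hC⟩ := caLoop_sound seq cand cand 0 PySem.Dict.empty
      (by intro f hf; rw [PySem.Dict.contains_empty] at hf; exact absurd hf (by simp))
      (fun a ha => (hmem a ha).2) (fun a ha => (hmem a ha).1) hpw hL
    have hlmem := List.getLast_mem hne
    have hl := hmem _ hlmem
    have hLS : lastStart cand 0 = cand.getLast hne + 1 := lastStart_eq cand hne 0
    intro j i hj0 hi hjn
    by_cases hcross : ∃ a ∈ cand, j ≤ a ∧ a < j + i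
    · obtain ⟨a, ha, h4, h5⟩ := hcross
      exact ⟨j, hj0, hjn, rfl, a, ha, h4, h5⟩
    · have hdisj : ∀ a ∈ cand, ¬(j ≤ a ∧ a < j + i) :=
        fun a ha hab => hcross ⟨a, ha, hab⟩
      rw [← crosses_isSome_iff seq cand hj0 hi hjn hmem]
      by_cases hji : j + i ≤ cand.getLast hne + 1
      · exact hC j i hj0 hi (by rw [hLS]; exact hji) hdisj
      · have hja : cand.getLast hne + 1 ≤ j := by
          have := hdisj (cand.getLast hne) hlmem; omega
        by_cases hcase : (seq.length : Int) - 1 ≠ cand.getLast hne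
        · rw [if_pos hcase] at htrue
          by_cases hg : (check_subfactors (cand.getLast hne + 1) ((seq.length : Int) - 1) seq cand
              (caLoop seq cand cand 0 PySem.Dict.empty).2.2.2).1 = true
          · obtain ⟨hT, _⟩ := csfI_sound (cand.getLast hne + 1) ((seq.length : Int) - 1) seq cand _
              (caLoop seq cand cand 0 PySem.Dict.empty).2.2.2 hI
              (by unfold check_subfactors at hg; exact hg)
            exact hT i (by rw [PySem.List.mem_pyRange_one]; omega) j
              (by rw [PySem.List.mem_pyRange_one]; omega)
          · rw [if_neg hg] at htrue; simp at htrue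
        · exfalso; omega
  · rw [if_neg hL] at htrue
    simp at htrue

lemma checkEq (seq cand : List Int) (hpw : cand.Pairwise (· < ·)) (hne : cand ≠ [])
    (hmem : ∀ a ∈ cand, 0 ≤ a ∧ a < (seq.length : Int)) :
    (check_attractor seq cand).1 = altCheck seq cand := by
  rw [Bool.eq_iff_iff]
  constructor
  · intro h
    rw [altCheck_iff]
    exact check_sound seq cand hpw hne hmem h
  · intro h
    exact check_complete seq cand hpw hne hmem ((altCheck_iff seq cand).mp h)

lemma find_eq (seq : List Int) (cands : List (List Int))
    (h : ∀ c ∈ cands, (check_attractor seq c).1 = altCheck seq c) :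
    gsaInner seq cands = altFind seq cands := by
  induction cands with
  | nil => rfl
  | cons c rest ih =>
    rw [gsaInner, altFind, h c (List.mem_cons_self ..)]
    cases hA : altCheck seq c <;>
      simp [ih (fun c' hc' => h c' (List.mem_cons_of_mem _ hc'))]

lemma outer_eq (seq : List Int) (sizes : List Int) (h1 : ∀ s ∈ sizes, 1 ≤ s) :
    gsaOuter seq sizes = altOuter seq sizes := by
  induction sizes with
  | nil => rfl
  | cons s rest ih =>
    rw [gsaOuter, altOuter]
    unfold generate_subsets
    have hf : gsaInner seq (PySem.List.combinations (PySem.List.pyRange 0 (seq.length : Int) 1) s.toNat)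
        = altFind seq (PySem.List.combinations (PySem.List.pyRange 0 (seq.length : Int) 1) s.toNat) := by
      apply find_eq
      intro c hc
      obtain ⟨hsub, hlen⟩ := (PySem.List.mem_combinations_iff _ _ _).mp hc
      have hpw : c.Pairwise (· < ·) :=
        (PySem.List.pairwise_lt_pyRange_one 0 ((seq.length : Int))).sublist hsub
      have hmem : ∀ a ∈ c, 0 ≤ a ∧ a < (seq.length : Int) :=
        fun a ha => PySem.List.mem_pyRange_one.mp (hsub.subset ha)
      have hne : c ≠ [] := by
        intro hnil
        rw [hnil] at hlen
        have hs1 := h1 s (List.mem_cons_self ..)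
        simp at hlen
        omega
      exact checkEq seq c hpw hne hmem
    rw [hf]
    cases hF : altFind seq (PySem.List.combinations (PySem.List.pyRange 0 (seq.length : Int) 1) s.toNat) <;>
      simp [ih (fun s' hs' => h1 s' (List.mem_cons_of_mem _ hs'))]

lemma nol_aux (l : List Int) (acc : List Int) (hacc : acc ≠ []) :
    l.foldl (fun chars x => if chars.contains x then chars else chars ++ [x]) acc ≠ [] := by
  induction l generalizing acc with
  | nil => exact hacc
  | cons x t ih =>
    rw [List.foldl_cons]
    apply ih
    by_cases hc : acc.contains x
    · rw [if_pos hc]; exact hacc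
    · rw [if_neg hc]; simp

lemma nol_pos (seq : List Int) (h : seq ≠ []) : 1 ≤ number_of_letters seq := by
  unfold number_of_letters
  rw [PySem.List.foldl_pyRange_zero_pyGetD' seq 0
    (fun chars x => if chars.contains x then chars else chars ++ [x]) []]
  cases seq with
  | nil => exact absurd rfl h
  | cons x t =>
    have hne : (x :: t).foldl (fun chars x => if chars.contains x then chars else chars ++ [x])
        ([] : List Int) ≠ [] := by
      rw [List.foldl_cons]
      apply nol_aux
      simp
    have hp : 0 < ((x :: t).foldl (fun chars x => if chars.contains x then chars else chars ++ [x])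
        ([] : List Int)).length := List.length_pos_of_ne_nil hne
    exact_mod_cast hp

-- ===== VERDICT (by name: the statement is the Claim_ definition above) =====
theorem get_smallest_attractor_spec : Claim_equal_get_smallest_attractor := by
  intro seq _ hpre
  unfold Spec_get_smallest_attractor get_smallest_attractor get_smallest_attractor_alt
  apply outer_eq
  intro s hs
  rw [PySem.List.mem_pyRange_one] at hs
  have h1 := nol_pos seq hpre
  have h2 : number_of_letters seq ≤
      max (PySem.Int.floordiv (seq.length : Int) (longest_repeated_length seq + 1))
        (number_of_letters seq) := le_max_right _ _
  omega
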